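-- pv_equiv track=rewrite | github.com/KevinFrias/Algorithm-Visualizer | helping_functions.py | ordenar_grafo_increasing
-- ===== SOURCE A (Python) =====
-- def ordenar_grafo_increasing(graph) :
--     # Primero creamos un diccionario para poder acomodar los datos de manera que
--     # la llave sea el peso y los valores, las aristas
--     resultado = {}
--
--     for u,value in graph.items():
--         for v, w in value :
--             if w in resultado.keys():
--                 temp = resultado[w]
--                 if ((u,v) not in temp and (v, u) not in temp) :
--                     temp.append((u,v))
--                 resultado[w] = temp
--             else :
--                 temp = []
--                 temp.append((u,v))
--                 resultado[w] = temp
--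
--     # Creo una lista con los pesos del grafo y la ordeno
--     # despues se recorre el diccionario por los indices ordenados y se autoasigna
--     myKeys = list(resultado.keys())
--     myKeys.sort()
--     resultado = {i: resultado[i] for i in myKeys}
--
--     return resultado
-- ===== SOURCE B (Python) =====
-- def ordenar_grafo_increasing(graph):
--     # Flatten the adjacency dict into (u, v, w) triples in iteration order,
--     # then for each distinct weight (ascending) collect its deduplicated
--     # edges by one filtered pass over the triples.
--     edges = [(u, v, w) for u, nbrs in graph.items() for v, w in nbrs]
--
--     def group(wt):
--         lst = []
--         for u, v, w in edges:
--             if w == wt and (u, v) not in lst and (v, u) not in lst: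
--                 lst.append((u, v))
--         return lst
--
--     return {wt: group(wt) for wt in sorted({w for _, _, w in edges})}
-- ===== Notes on version B (the rewrite author's own statement) =====
-- stated objective: alternative
-- what changed: Instead of incrementally grouping edges into a weight-keyed dict and re-sorting its keys afterwards, B flattens the graph to (u,v,w) triples once, computes the sorted set of weights, and builds each weight's deduplicated edge list by an independent filtered pass over the triples.
import Mathlib
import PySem

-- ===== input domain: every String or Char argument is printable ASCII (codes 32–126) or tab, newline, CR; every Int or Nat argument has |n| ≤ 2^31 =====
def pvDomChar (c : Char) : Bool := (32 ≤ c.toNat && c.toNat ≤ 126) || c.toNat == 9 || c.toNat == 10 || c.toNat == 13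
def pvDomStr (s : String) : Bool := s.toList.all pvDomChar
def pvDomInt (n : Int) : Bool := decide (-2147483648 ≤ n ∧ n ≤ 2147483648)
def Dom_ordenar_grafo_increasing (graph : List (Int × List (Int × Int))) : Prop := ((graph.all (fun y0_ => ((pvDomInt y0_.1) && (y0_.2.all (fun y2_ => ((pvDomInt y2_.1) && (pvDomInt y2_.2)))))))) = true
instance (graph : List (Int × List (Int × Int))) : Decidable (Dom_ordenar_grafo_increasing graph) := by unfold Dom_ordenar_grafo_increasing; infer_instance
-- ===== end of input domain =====

-- B replaces A's incremental weight-keyed dict grouping (plus a final key sort) by a flatten-once /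
-- sorted-distinct-weights / one-filtered-pass-per-weight decomposition (objective: alternative, not faster).

-- ===== PORT A =====
-- literal port of A: build dict weight -> deduped edge list while iterating, then sort the keys
-- and rebuild the dict in sorted-key order.  `resultado[w]` inside the `contains` branch is ported
-- as `getD … []` — exact there, since the key is present.
def ordenar_grafo_increasing (graph : List (Int × List (Int × Int))) : List (Int × List (Int × Int)) :=
  let resultado : PySem.Dict Int (List (Int × Int)) :=
    graph.foldl (fun resultado p =>
      p.2.foldl (fun resultado q =>
        if resultado.contains q.2 then
          let temp := resultado.getD q.2 []
          let temp := if (p.1, q.1) ∉ temp ∧ (q.1, p.1) ∉ temp then temp ++ [(p.1, q.1)] else temp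
          resultado.insert q.2 temp
        else
          resultado.insert q.2 [(p.1, q.1)]) resultado) PySem.Dict.empty
  let myKeys := PySem.List.sorted resultado.keys (fun x => x) false
  (PySem.Dict.ofList (myKeys.map (fun i => (i, resultado.getD i [])))).items

-- ===== PORT B =====
-- literal port of Source B: flatten to (u,v,w) triples, take the sorted set of weights and build each
-- weight's deduplicated edge list by one filtered pass over the triples (dict comprehension).
def ordenar_grafo_increasing_alt (graph : List (Int × List (Int × Int))) : List (Int × List (Int × Int)) :=
  let edges := graph.flatMap (fun p => p.2.map (fun q => (p.1, q.1, q.2)))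
  let weights := PySem.List.sorted (PySem.Set.ofList (edges.map (fun e => e.2.2))) (fun x => x) false
  (PySem.Dict.ofList (weights.map (fun wt => (wt,
    edges.foldl (fun lst e =>
      if e.2.2 = wt ∧ (e.1, e.2.1) ∉ lst ∧ (e.2.1, e.1) ∉ lst then lst ++ [(e.1, e.2.1)] else lst)
      [])))).items

-- ===== PRECONDITION & SPEC =====
def Spec_ordenar_grafo_increasing (graph : List (Int × List (Int × Int))) (out : List (Int × List (Int × Int))) : Prop := out = ordenar_grafo_increasing_alt graph
instance (graph : List (Int × List (Int × Int))) (out : List (Int × List (Int × Int))) : Decidable (Spec_ordenar_grafo_increasing graph out) := by unfold Spec_ordenar_grafo_increasing; infer_instance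

-- ===== CLAIM (what is proved, stated in full; the proofs are below) =====
def Claim_equal_ordenar_grafo_increasing : Prop := ∀ (graph : List (Int × List (Int × Int))), Dom_ordenar_grafo_increasing graph → Spec_ordenar_grafo_increasing graph (ordenar_grafo_increasing graph)

-- ===== LEMMAS AND PROOFS =====

-- the flattened triples, A's per-edge dict step and the per-weight collector (proof-side helpers)
def pvFlat (g : List (Int × List (Int × Int))) : List (Int × Int × Int) :=
  g.flatMap (fun p => p.2.map (fun q => (p.1, q.1, q.2)))

def pvStep (wt : Int) (lst : List (Int × Int)) (e : Int × Int × Int) : List (Int × Int) :=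
  if e.2.2 = wt ∧ (e.1, e.2.1) ∉ lst ∧ (e.2.1, e.1) ∉ lst then lst ++ [(e.1, e.2.1)] else lst

def pvCollect (wt : Int) (es : List (Int × Int × Int)) : List (Int × Int) :=
  es.foldl (pvStep wt) []

def pvStepA (d : PySem.Dict Int (List (Int × Int))) (e : Int × Int × Int) :
    PySem.Dict Int (List (Int × Int)) :=
  if d.contains e.2.2 then
    let temp := d.getD e.2.2 []
    let temp := if (e.1, e.2.1) ∉ temp ∧ (e.2.1, e.1) ∉ temp then temp ++ [(e.1, e.2.1)] else temp
    d.insert e.2.2 temp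
  else
    d.insert e.2.2 [(e.1, e.2.1)]

-- nested loop over the graph = single loop over the flattened triples
lemma pv_foldl_flat {σ : Type} (f : σ → (Int × Int × Int) → σ) :
    ∀ (g : List (Int × List (Int × Int))) (init : σ),
      g.foldl (fun s p => p.2.foldl (fun s q => f s (p.1, q.1, q.2)) s) init
        = (pvFlat g).foldl f init := by
  intro g
  induction g with
  | nil => intro init; rfl
  | cons p g ih =>
      intro init
      simp only [List.foldl_cons, pvFlat, List.flatMap_cons, List.foldl_append, List.foldl_map]
      exact ih _

lemma pvStep_ne (wt : Int) (lst : List (Int × Int)) (e : Int × Int × Int) (h : e.2.2 ≠ wt) :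
    pvStep wt lst e = lst := by
  simp [pvStep, h]

lemma pvCollect_append (wt : Int) (es : List (Int × Int × Int)) (e : Int × Int × Int) :
    pvCollect wt (es ++ [e]) = pvStep wt (pvCollect wt es) e := by
  simp [pvCollect, List.foldl_append]

lemma pvCollect_nil (wt : Int) (es : List (Int × Int × Int))
    (h : ∀ e ∈ es, e.2.2 ≠ wt) : pvCollect wt es = [] := by
  induction es with
  | nil => rfl
  | cons e es ih =>
      have he : pvStep wt [] e = [] := pvStep_ne wt [] e (h e (by simp))
      simp only [pvCollect, List.foldl_cons, he]
      exact ih (fun e' he' => h e' (by simp [he']))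

-- dict whose items are ws.map (wt, f wt): lookup / contains / insert facts
lemma pv_contains_map (ws : List Int) (f : Int → List (Int × Int)) (k : Int) :
    (PySem.Dict.mk (ws.map (fun wt => (wt, f wt)))).contains k = decide (k ∈ ws) := by
  induction ws with
  | nil => rfl
  | cons w ws ih =>
      simp only [PySem.Dict.contains, List.map_cons, List.any_cons] at *
      by_cases h : w = k
      · simp [h]
      · simp only [ih]
        have hb : ((w, f w).1 == k) = false := by simpa using h
        simp [hb, Ne.symm h]

lemma pv_get?_map (ws : List Int) (f : Int → List (Int × Int)) (k : Int) (hk : k ∈ ws) :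
    (PySem.Dict.mk (ws.map (fun wt => (wt, f wt)))).get? k = some (f k) := by
  induction ws with
  | nil => cases hk
  | cons w ws ih =>
      by_cases h : w = k
      · subst h; simp [PySem.Dict.get?]
      · have hk' : k ∈ ws := by
          rcases List.mem_cons.mp hk with h' | h'
          · exact absurd h'.symm h
          · exact h'
        have hb : ((w, f w).1 == k) = false := by simpa using h
        simpa [PySem.Dict.get?, List.find?, hb] using ih hk'

lemma pv_insert_map (ws : List Int) (f : Int → List (Int × Int)) (k : Int) (v : List (Int × Int))
    (hk : k ∈ ws) :
    (PySem.Dict.mk (ws.map (fun wt => (wt, f wt)))).insert k v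
      = PySem.Dict.mk (ws.map (fun wt => (wt, if wt = k then v else f wt))) := by
  have hc : (PySem.Dict.mk (ws.map (fun wt => (wt, f wt)))).contains k = true := by
    rw [pv_contains_map]; simpa using hk
  unfold PySem.Dict.insert
  rw [if_pos hc]
  congr 1
  rw [List.map_map]
  refine List.map_congr_left (fun wt _ => ?_)
  by_cases h : wt = k
  · subst h; simp
  · have hb : ((wt, f wt).1 == k) = false := by simpa using h
    simp [Function.comp, hb, h]

-- the invariant of A's grouping loop: after processing es, the dict's items are the weights in
-- first-occurrence order, each paired with the per-weight collector's value on es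
lemma pv_dict_inv (es : List (Int × Int × Int)) :
    es.foldl pvStepA PySem.Dict.empty
      = PySem.Dict.mk ((PySem.Set.ofList (es.map (fun e => e.2.2))).map
          (fun wt => (wt, pvCollect wt es))) := by
  induction es using List.reverseRecOn with
  | nil => rfl
  | append_singleton es e ih =>
      rw [List.foldl_append, List.foldl_cons, List.foldl_nil, ih]
      have hofl : PySem.Set.ofList ((es ++ [e]).map (fun e => e.2.2))
          = PySem.Set.add (PySem.Set.ofList (es.map (fun e => e.2.2))) e.2.2 := by
        rw [PySem.Set.ofList_eq_foldl, PySem.Set.ofList_eq_foldl]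
        simp [List.foldl_append]
      set ws := PySem.Set.ofList (es.map (fun e => e.2.2)) with hws
      by_cases hmem : e.2.2 ∈ ws
      · -- weight already present: dict entry at e.2.2 is updated, the others are untouched
        have hc : (PySem.Dict.mk (ws.map (fun wt => (wt, pvCollect wt es)))).contains e.2.2
            = true := by rw [pv_contains_map]; simpa using hmem
        have hget := pv_get?_map ws (fun wt => pvCollect wt es) e.2.2 hmem
        have hadd : PySem.Set.add ws e.2.2 = ws := by
          simp only [PySem.Set.add, PySem.Set.contains]
          rw [if_pos (by simpa using hmem)]
        rw [hofl, hadd]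
        unfold pvStepA
        rw [if_pos hc]
        simp only [PySem.Dict.getD, hget, Option.getD_some]
        rw [pv_insert_map ws (fun wt => pvCollect wt es) e.2.2 _ hmem]
        congr 1
        refine List.map_congr_left (fun wt _ => ?_)
        by_cases h : wt = e.2.2
        · subst h
          rw [pvCollect_append]
          simp [pvStep]
        · rw [pvCollect_append, pvStep_ne wt (pvCollect wt es) e (fun hh => h hh.symm)]
          simp [h]
      · -- new weight: appended at the end with the singleton edge list
        have hc : (PySem.Dict.mk (ws.map (fun wt => (wt, pvCollect wt es)))).contains e.2.2
            = false := by rw [pv_contains_map]; simpa using hmem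
        have hadd : PySem.Set.add ws e.2.2 = ws ++ [e.2.2] := by
          simp only [PySem.Set.add, PySem.Set.contains]
          rw [if_neg (by simpa using hmem)]
        have hnilw : pvCollect e.2.2 es = [] := by
          refine pvCollect_nil _ _ (fun e' he' hw => hmem ?_)
          rw [hws, PySem.Set.mem_ofList]
          exact List.mem_map.mpr ⟨e', he', hw⟩
        rw [hofl, hadd]
        unfold pvStepA
        rw [if_neg (by simp [hc])]
        unfold PySem.Dict.insert
        rw [if_neg (by simp [hc])]
        congr 1
        rw [List.map_append]
        congr 1
        · refine List.map_congr_left (fun wt hwt => ?_)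
          have hne : e.2.2 ≠ wt := fun hh => hmem (hh ▸ hwt)
          rw [pvCollect_append, pvStep_ne wt (pvCollect wt es) e hne]
        · rw [List.map_cons, List.map_nil, pvCollect_append, hnilw]
          simp [pvStep]

-- both ports compute Dict.ofList ((sorted distinct weights).map (wt, pvCollect wt flat)) .items
lemma pv_common (graph : List (Int × List (Int × Int))) :
    ordenar_grafo_increasing graph = ordenar_grafo_increasing_alt graph := by
  set ws : List Int := PySem.Set.ofList ((pvFlat graph).map (fun e => e.2.2)) with hws
  set sws : List Int := PySem.List.sorted ws (fun x => x) false with hsws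
  have hdict : graph.foldl (fun d p => p.2.foldl (fun d q => pvStepA d (p.1, q.1, q.2)) d)
      PySem.Dict.empty
      = PySem.Dict.mk (ws.map (fun wt => (wt, pvCollect wt (pvFlat graph)))) := by
    rw [pv_foldl_flat pvStepA graph PySem.Dict.empty, pv_dict_inv]
  have hA : ordenar_grafo_increasing graph
      = (PySem.Dict.ofList (sws.map (fun i => (i, pvCollect i (pvFlat graph))))).items := by
    show (PySem.Dict.ofList ((PySem.List.sorted
        (graph.foldl (fun d p => p.2.foldl (fun d q => pvStepA d (p.1, q.1, q.2)) d)
          PySem.Dict.empty).keys (fun x => x) false).map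
        (fun i => (i, (graph.foldl (fun d p => p.2.foldl (fun d q => pvStepA d (p.1, q.1, q.2)) d)
          PySem.Dict.empty).getD i [])))).items = _
    rw [hdict]
    have hkeys : (PySem.Dict.mk (ws.map (fun wt => (wt, pvCollect wt (pvFlat graph))))).keys
        = ws := by simp [PySem.Dict.keys, Function.comp_def]
    rw [hkeys]
    congr 2
    refine List.map_congr_left (fun i hi => ?_)
    have hi' : i ∈ ws := (PySem.List.mem_sorted ws (fun x => x) false i).mp hi
    have hg := pv_get?_map ws (fun wt => pvCollect wt (pvFlat graph)) i hi'
    simp [PySem.Dict.getD, hg]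
  have hB : ordenar_grafo_increasing_alt graph
      = (PySem.Dict.ofList (sws.map (fun wt => (wt, pvCollect wt (pvFlat graph))))).items := rfl
  rw [hA, hB]

-- ===== VERDICT (by name: the statement is the Claim_ definition above) =====
theorem ordenar_grafo_increasing_spec : Claim_equal_ordenar_grafo_increasing := by
  intro graph _
  show ordenar_grafo_increasing graph = ordenar_grafo_increasing_alt graph
  exact pv_common graph
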